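-- pv_equiv track=rewrite | github.com/rwei1218/Seq2Seq_pretrained | rouge_process.py | clean_infer
-- ===== SOURCE A (Python) =====
-- def clean_infer(text_list):
--     final_list = []
--     for word in text_list:
--         if word != '[CLS]':
--             if word != '[SEP]':
--                 final_list.append(word)
--             else:
--                 break
--     return final_list
-- ===== SOURCE B (Python) =====
-- def clean_infer(text_list):
--     truncated = text_list[:text_list.index('[SEP]')] if '[SEP]' in text_list else text_list
--     return [w for w in truncated if w != '[CLS]']
-- ===== Notes on version B (the rewrite author's own statement) =====
-- stated objective: idiomatic
-- what changed: Replaces the fused skip-or-break loop by a two-stage pipeline: locate the [SEP] boundary (membership test + .index + slice), then filter out [CLS] with a comprehension.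
import Mathlib
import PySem

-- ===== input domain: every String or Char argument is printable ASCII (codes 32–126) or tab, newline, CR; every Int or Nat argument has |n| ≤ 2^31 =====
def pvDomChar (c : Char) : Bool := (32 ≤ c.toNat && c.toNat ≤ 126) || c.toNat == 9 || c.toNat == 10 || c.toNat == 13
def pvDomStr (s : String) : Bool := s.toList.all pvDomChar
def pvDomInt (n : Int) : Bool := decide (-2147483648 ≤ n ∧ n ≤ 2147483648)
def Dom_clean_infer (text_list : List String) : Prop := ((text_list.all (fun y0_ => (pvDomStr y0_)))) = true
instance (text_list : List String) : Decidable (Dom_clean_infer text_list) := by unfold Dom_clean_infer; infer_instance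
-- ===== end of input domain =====

-- B replaces the fused skip-or-break loop by a boundary-locate pass then a filter pass (idiomatic; return value only).
-- ===== PORT A =====
def clean_infer (text_list : List String) : List String :=
  match text_list with
  | [] => []
  | word :: rest =>
    if word ≠ "[CLS]" then
      if word ≠ "[SEP]" then word :: clean_infer rest
      else []
    else clean_infer rest

-- ===== PORT B =====
-- B-side helper: the 'truncated' value of Source B (membership-guarded .index + slice)
def pvTrunc (text_list : List String) : List String :=
  if "[SEP]" ∈ text_list then
    match PySem.List.index? text_list "[SEP]" with
    | some i => PySem.List.slice text_list none (some (i : Int))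
    | none => text_list
  else text_list

def clean_infer_alt (text_list : List String) : List String :=
  (pvTrunc text_list).filter (fun w => w ≠ "[CLS]")

-- ===== PRECONDITION & SPEC =====
def Spec_clean_infer (text_list : List String) (out : List String) : Prop := out = clean_infer_alt text_list
instance (text_list : List String) (out : List String) : Decidable (Spec_clean_infer text_list out) := by unfold Spec_clean_infer; infer_instance

-- ===== CLAIM (what is proved, stated in full; the proofs are below) =====
def Claim_equal_clean_infer : Prop := ∀ (text_list : List String), Dom_clean_infer text_list → Spec_clean_infer text_list (clean_infer text_list)

-- ===== LEMMAS AND PROOFS =====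
lemma pvTrunc_nil : pvTrunc [] = [] := by simp [pvTrunc]

lemma pvTrunc_cons (w : String) (rest : List String) :
    pvTrunc (w :: rest) = if w = "[SEP]" then [] else w :: pvTrunc rest := by
  by_cases hw : w = "[SEP]"
  · subst hw
    rw [pvTrunc, if_pos (List.mem_cons_self), PySem.List.index?_cons_self]
    simp [PySem.List.slice]
  · by_cases hm : "[SEP]" ∈ rest
    · obtain ⟨k, hk⟩ := Option.isSome_iff_exists.mp ((PySem.List.index?_isSome_iff rest "[SEP]").2 hm)
      rw [pvTrunc, if_pos (by simp [hm]),
        PySem.List.index?_cons_of_ne rest hw, hk, Option.map_some,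
        if_neg hw, pvTrunc, if_pos hm, hk]
      show PySem.List.slice (w :: rest) none (some ((k + 1 : Nat) : Int))
            = w :: PySem.List.slice rest none (some ((k : Nat) : Int))
      rw [PySem.List.slice_to_natCast, PySem.List.slice_to_natCast]
      simp [List.take_succ_cons]
    · have : "[SEP]" ∉ (w :: rest) := by simp [hm]; intro h; exact hw h.symm
      simp only [pvTrunc, this, if_false]
      simp [hm, hw]

lemma clean_infer_eq_alt (l : List String) : clean_infer l = clean_infer_alt l := by
  induction l with
  | nil => simp [clean_infer, clean_infer_alt, pvTrunc_nil]
  | cons w rest ih =>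
    simp only [clean_infer_alt, pvTrunc_cons]
    by_cases hs : w = "[SEP]"
    · subst hs
      simp [clean_infer]
    · by_cases hc : w = "[CLS]"
      · subst hc
        simp only [if_neg hs]
        simp [clean_infer, ih, clean_infer_alt]
      · simp only [if_neg hs, List.filter_cons]
        simp [clean_infer, hs, hc, ih, clean_infer_alt]

-- ===== VERDICT (by name: the statement is the Claim_ definition above) =====
theorem clean_infer_spec : Claim_equal_clean_infer := by
  intro text_list _
  unfold Spec_clean_infer
  exact clean_infer_eq_alt text_list
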